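-- pv_equiv track=rewrite | github.com/tuanhiep/expertpy | identical_shape_in_matrix.py | countIdenticalShapes
-- ===== SOURCE A (Python) =====
-- def countIdenticalShapes(matrix):
--     seen_shapes = set()
--
--     def normalize_shape(shape):
--         # Find the top-leftmost cell in the shape
--         min_row, min_col = min(shape, key=lambda x: (x[0], x[1]))
--
--         # Normalize the shape by shifting all cells relative to the reference point
--         normalized_shape_result = [(row - min_row, col - min_col) for row, col in shape]
--
--         # Sort the normalized shape for consistency
--         normalized_shape_result.sort()
--
--         return normalized_shape_result
--
--     def dfs(row, col, shape):
--         # Base case: Out of bounds or not part of the shape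
--         if row < 0 or row >= len(matrix) or col < 0 or col >= len(matrix[0]) or matrix[row][col] == 0:
--             return
--
--         # Mark cell as visited
--         matrix[row][col] = 0
--
--         # Update the shape relative to a reference point
--         shape.append((row, col))
--
--         # Recursive DFS in all 4 directions
--         dfs(row + 1, col, shape)
--         dfs(row - 1, col, shape)
--         dfs(row, col + 1, shape)
--         dfs(row, col - 1, shape)
--
--     for row in range(len(matrix)):
--         for col in range(len(matrix[0])):
--             if matrix[row][col] == 1:
--                 shape = []
--                 dfs(row, col, shape)
--
--                 # Normalize and store the shape
--                 normalized_shape = normalize_shape(shape)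
--                 seen_shapes.add(tuple(normalized_shape))
--
--     return len(seen_shapes)
-- ===== SOURCE B (Python) =====
-- def countIdenticalShapes(matrix):
--     seen_shapes = set()
--
--     for row, col in ((r, c) for r in range(len(matrix)) for c in range(len(matrix[0]))):
--         if matrix[row][col] == 1:
--             shape = []
--             stack = [(row, col)]
--             while stack:
--                 r, c = stack.pop()
--                 if matrix[r][c] == 0:
--                     continue
--                 matrix[r][c] = 0
--                 shape.append((r, c))
--                 for nbr in ((r, c - 1), (r, c + 1), (r - 1, c), (r + 1, c)):
--                     if 0 <= nbr[0] < len(matrix) and 0 <= nbr[1] < len(matrix[0]) and matrix[nbr[0]][nbr[1]] != 0: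
--                         stack.append(nbr)
--             cells = sorted(shape)
--             base = cells[0]
--             seen_shapes.add(tuple((r - base[0], c - base[1]) for r, c in cells))
--
--     return len(seen_shapes)
-- ===== Notes on version B (the rewrite author's own statement) =====
-- stated objective: alternative
-- what changed: The recursive 4-directional DFS with nested helpers is replaced by a single flat scan over all (row,col) cells running an iterative worklist flood fill (explicit stack, bounds-checked before pushing) and a sort-first normalization (sort the component once, then shift by its first cell) instead of min-then-shift-then-sort.
import Mathlib
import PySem

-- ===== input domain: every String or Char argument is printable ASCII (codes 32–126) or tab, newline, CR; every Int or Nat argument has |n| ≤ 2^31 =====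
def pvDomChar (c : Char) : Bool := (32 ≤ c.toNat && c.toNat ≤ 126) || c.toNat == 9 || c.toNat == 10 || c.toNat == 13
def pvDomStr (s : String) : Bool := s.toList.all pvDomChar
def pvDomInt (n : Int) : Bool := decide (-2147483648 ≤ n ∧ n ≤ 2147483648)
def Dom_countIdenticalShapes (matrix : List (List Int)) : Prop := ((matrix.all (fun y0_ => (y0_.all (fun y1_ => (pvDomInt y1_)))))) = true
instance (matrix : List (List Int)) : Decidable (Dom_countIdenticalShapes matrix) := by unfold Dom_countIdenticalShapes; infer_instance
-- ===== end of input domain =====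

-- B replaces A's recursive 4-directional DFS (nested helpers, min-then-sort
-- normalization, nested row/col loops) by a single flat scan over all cells with an
-- iterative worklist flood fill (explicit stack, neighbours bounds-checked before
-- being pushed) and a sort-first canonicalization (objective: alternative, same
-- cost); in Python both A and B zero the matched cells of `matrix` in place
-- (identically), and the equivalence proved here is about the return value.

-- ===== PORT A =====
def matget (m : List (List Int)) (r c : Int) : Int := (m.getD r.toNat []).getD c.toNat 0

def matzero (m : List (List Int)) (r c : Int) : List (List Int) :=
  m.set r.toNat ((m.getD r.toNat []).set c.toNat 0)

def nzRow (row : List Int) : Nat := (row.filter (fun x => x != 0)).length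

def nzMat (m : List (List Int)) : Nat := (m.map nzRow).sum

-- A's dfs base-case test, left-to-right as in Python:
-- row < 0 or row >= len(matrix) or col < 0 or col >= len(matrix[0]) or matrix[row][col] == 0
def dfsStop (m : List (List Int)) (r c : Int) : Bool :=
  decide (r < 0) || decide ((m.length : Int) ≤ r) || decide (c < 0) ||
    decide (((m.headD []).length : Int) ≤ c) || (matget m r c == 0)

-- A's recursive dfs; state = (matrix, shape).  The Nat argument is fuel, a pure
-- totality guard: every recursive call first zeroes a nonzero cell, so the call depth
-- is bounded by the nonzero-cell count and the entry fuel nzMat m + 1 is never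
-- exhausted (dfsF_fuel below proves fuel-independence above nzMat m).
def dfsF : Nat → List (List Int) → List (Int × Int) → Int → Int →
    (List (List Int)) × (List (Int × Int))
  | 0, m, sh, _, _ => (m, sh)
  | f + 1, m, sh, r, c =>
    if dfsStop m r c then (m, sh)
    else
      let s1 := dfsF f (matzero m r c) (sh ++ [(r, c)]) (r + 1) c
      let s2 := dfsF f s1.1 s1.2 (r - 1) c
      let s3 := dfsF f s2.1 s2.2 r (c + 1)
      dfsF f s3.1 s3.2 r (c - 1)

-- normalize_shape: reference = min(shape, key=(row, col)); shift; sort (lexicographic)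
def normalizeShape (shape : List (Int × Int)) : List (Int × Int) :=
  match PySem.List.min2? shape (fun p => p.1) (fun p => p.2) with
  | none => []
  | some (mr, mc) =>
      PySem.List.sorted2 (shape.map (fun p => (p.1 - mr, p.2 - mc)))
        (fun p => p.1) (fun p => p.2)

-- body of A's double loop: if matrix[row][col] == 1: shape = []; dfs; add normalized shape
def stepA (st : (List (List Int)) × PySem.Set (List (Int × Int))) (r c : Int) :
    (List (List Int)) × PySem.Set (List (Int × Int)) :=
  if matget st.1 r c == 1 then
    let res := dfsF (nzMat st.1 + 1) st.1 [] r c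
    (res.1, PySem.Set.add st.2 (normalizeShape res.2))
  else st

def countIdenticalShapes (matrix : List (List Int)) : Int :=
  let st := (PySem.List.pyRange 0 (matrix.length : Int) 1).foldl
    (fun st r =>
      (PySem.List.pyRange 0 ((matrix.headD []).length : Int) 1).foldl
        (fun st c => stepA st r c) st)
    (matrix, PySem.Set.empty)
  PySem.List.len st.2

-- ===== PORT B =====
-- B's own cell primitives take the cell as a pair
def cellAt (m : List (List Int)) (p : Int × Int) : Int :=
  (m.getD p.1.toNat []).getD p.2.toNat 0

def clearAt (m : List (List Int)) (p : Int × Int) : List (List Int) :=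
  m.set p.1.toNat ((m.getD p.1.toNat []).set p.2.toNat 0)

-- B's push guard: 0 <= nbr[0] < len(matrix) and 0 <= nbr[1] < len(matrix[0])
def inGrid (m : List (List Int)) (p : Int × Int) : Bool :=
  decide (0 ≤ p.1) && decide (p.1 < (m.length : Int)) &&
    decide (0 ≤ p.2) && decide (p.2 < ((m.headD []).length : Int))

def totalCells (m : List (List Int)) : Nat := m.foldl (fun a row => a + row.length) 0

-- B's while-loop: pop a cell; skip it if already zeroed; otherwise zero it, record it,
-- and push the in-bounds nonzero neighbours.  Head of the list = top of Python's
-- stack; Python pushes the candidates in order (r,c-1),(r,c+1),(r-1,c),(r+1,c), so in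
-- pop (= head-first) order the surviving candidates read (r+1,c),(r-1,c),(r,c+1),(r,c-1).
-- Fuel is a pure totality guard: every non-skipping iteration zeroes a nonzero cell
-- and pushes at most four cells, so the loop runs at most |stack| + 4·(nonzero cells)
-- times and the entry fuel 4·totalCells+2 of stepB is never exhausted.
def floodB : Nat → (List (List Int)) × (List (Int × Int)) → List (Int × Int) →
    (List (List Int)) × (List (Int × Int))
  | 0, st, _ => st
  | _ + 1, st, [] => st
  | f + 1, (m, sh), p :: rest =>
    if cellAt m p == 0 then floodB f (m, sh) rest
    else
      let m' := clearAt m p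
      let nbrs := [(p.1 + 1, p.2), (p.1 - 1, p.2), (p.1, p.2 + 1), (p.1, p.2 - 1)].filter
        (fun q => inGrid m' q && (cellAt m' q != 0))
      floodB f (m', sh ++ [p]) (nbrs ++ rest)

-- cells = sorted(shape); base = cells[0]; tuple((r-base[0], c-base[1]) for r,c in cells)
def canonShape (shape : List (Int × Int)) : List (Int × Int) :=
  match PySem.List.sorted2 shape (fun p => p.1) (fun p => p.2) with
  | [] => []      -- unreachable in B: the flood fill always records at least one cell
  | base :: t => (base :: t).map (fun q => (q.1 - base.1, q.2 - base.2))

def stepB (st : (List (List Int)) × PySem.Set (List (Int × Int))) (p : Int × Int) :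
    (List (List Int)) × PySem.Set (List (Int × Int)) :=
  if cellAt st.1 p == 1 then
    let res := floodB (4 * totalCells st.1 + 2) (st.1, []) [p]
    (res.1, PySem.Set.add st.2 (canonShape res.2))
  else st

-- flat scan: for row, col in ((r, c) for r in range(len(matrix)) for c in range(len(matrix[0])))
def countIdenticalShapes_alt (matrix : List (List Int)) : Int :=
  let cells := (PySem.List.pyRange 0 (matrix.length : Int) 1).flatMap
    (fun r => (PySem.List.pyRange 0 ((matrix.headD []).length : Int) 1).map (fun c => (r, c)))
  PySem.List.len (cells.foldl stepB (matrix, PySem.Set.empty)).2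

-- ===== PRECONDITION & SPEC =====
-- Pre_ excludes exactly the ragged matrices with a row shorter than row 0: on those
-- Python A raises IndexError in its row/col scan (B raises there too).
def Pre_countIdenticalShapes (matrix : List (List Int)) : Prop :=
  ∀ row ∈ matrix, (matrix.headD []).length ≤ row.length
instance (matrix : List (List Int)) : Decidable (Pre_countIdenticalShapes matrix) := by
  unfold Pre_countIdenticalShapes; infer_instance

def pvWitness_countIdenticalShapes : List (List Int) := [[1, 0], [0, 1]]

def Spec_countIdenticalShapes (matrix : List (List Int)) (out : Int) : Prop :=
  out = countIdenticalShapes_alt matrix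
instance (matrix : List (List Int)) (out : Int) : Decidable (Spec_countIdenticalShapes matrix out) := by
  unfold Spec_countIdenticalShapes; infer_instance

-- ===== CLAIM (what is proved, stated in full; the proofs are below) =====
def Claim_equal_countIdenticalShapes : Prop := ∀ (matrix : List (List Int)), Dom_countIdenticalShapes matrix → Pre_countIdenticalShapes matrix → Spec_countIdenticalShapes matrix (countIdenticalShapes matrix)

-- ===== LEMMAS AND PROOFS =====

theorem nzRow_set_lt (row : List Int) (j : Nat) (h : row.getD j 0 ≠ 0) :
    nzRow (row.set j 0) < nzRow row := by
  induction row generalizing j with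
  | nil => simp at h
  | cons a t ih =>
    cases j with
    | zero =>
      simp only [List.getD_cons_zero] at h
      have ha : (a != 0) = true := by simpa using h
      simp [nzRow, List.filter, ha]
    | succ j =>
      simp only [List.getD_cons_succ] at h
      have := ih j h
      by_cases ha : (a != 0) = true
      · simp [nzRow, List.filter, ha] at this ⊢
        omega
      · simp [nzRow, List.filter, ha] at this ⊢
        omega

theorem nz_matzero_lt (m : List (List Int)) (r c : Int) (h : matget m r c ≠ 0) :
    nzMat (matzero m r c) < nzMat m := by
  unfold matget at h
  unfold matzero
  generalize r.toNat = i at *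
  generalize c.toNat = j at *
  induction m generalizing i with
  | nil => simp at h
  | cons row t ih =>
    cases i with
    | zero =>
      simp only [List.getD_cons_zero] at h
      simp [nzMat, nzRow_set_lt row j h]
    | succ i =>
      simp only [List.getD_cons_succ] at h
      simp [nzMat] at *
      exact ih i h

theorem matget_ne_of_stop_false {m : List (List Int)} {r c : Int}
    (h : ¬ dfsStop m r c = true) : matget m r c ≠ 0 := by
  intro hm
  apply h
  simp [dfsStop, hm]

theorem not_stop_iff (m : List (List Int)) (r c : Int) :
    (¬ dfsStop m r c = true) ↔
      (0 ≤ r ∧ r < (m.length : Int) ∧ 0 ≤ c ∧ c < ((m.headD []).length : Int) ∧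
        matget m r c ≠ 0) := by
  simp [dfsStop, not_or, not_lt, not_le]
  tauto

theorem dfsF_nz (f : Nat) : ∀ m sh r c, nzMat (dfsF f m sh r c).1 ≤ nzMat m := by
  induction f with
  | zero => intro m sh r c; simp [dfsF]
  | succ f ih =>
    intro m sh r c
    simp only [dfsF]
    by_cases h : dfsStop m r c
    · simp [h]
    · simp only [if_neg h]
      have h0 : nzMat (matzero m r c) < nzMat m :=
        nz_matzero_lt m r c (matget_ne_of_stop_false h)
      exact le_trans (ih _ _ _ _)
        (le_trans (ih _ _ _ _)
          (le_trans (ih _ _ _ _) (le_trans (ih _ _ _ _) (le_of_lt h0))))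

theorem dfsF_fuel (f : Nat) : ∀ g m sh r c, nzMat m < f → nzMat m < g →
    dfsF f m sh r c = dfsF g m sh r c := by
  induction f with
  | zero => intro g m sh r c hf; exact absurd hf (Nat.not_lt_zero _)
  | succ f ih =>
    intro g m sh r c hf hg
    cases g with
    | zero => exact absurd hg (Nat.not_lt_zero _)
    | succ g =>
      simp only [dfsF]
      by_cases h : dfsStop m r c
      · simp [h]
      · simp only [if_neg h]
        have h0 : nzMat (matzero m r c) < nzMat m :=
          nz_matzero_lt m r c (matget_ne_of_stop_false h)
        have hb : nzMat (matzero m r c) < f := by omega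
        have hb' : nzMat (matzero m r c) < g := by omega
        have e1 : dfsF f (matzero m r c) (sh ++ [(r, c)]) (r + 1) c =
            dfsF g (matzero m r c) (sh ++ [(r, c)]) (r + 1) c := ih g _ _ _ _ hb hb'
        rw [e1]
        set t1 := dfsF g (matzero m r c) (sh ++ [(r, c)]) (r + 1) c with ht1
        have n1 : nzMat t1.1 ≤ nzMat (matzero m r c) := by
          rw [ht1]; exact dfsF_nz g _ _ _ _
        have e2 : dfsF f t1.1 t1.2 (r - 1) c = dfsF g t1.1 t1.2 (r - 1) c :=
          ih g _ _ _ _ (by omega) (by omega)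
        rw [e2]
        set t2 := dfsF g t1.1 t1.2 (r - 1) c with ht2
        have n2 : nzMat t2.1 ≤ nzMat t1.1 := by
          rw [ht2]; exact dfsF_nz g _ _ _ _
        have e3 : dfsF f t2.1 t2.2 r (c + 1) = dfsF g t2.1 t2.2 r (c + 1) :=
          ih g _ _ _ _ (by omega) (by omega)
        rw [e3]
        set t3 := dfsF g t2.1 t2.2 r (c + 1) with ht3
        have n3 : nzMat t3.1 ≤ nzMat t2.1 := by
          rw [ht3]; exact dfsF_nz g _ _ _ _
        exact ih g _ _ _ _ (by omega) (by omega)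

-- one full dfs call as a fold step over the worklist
def dstepN (st : (List (List Int)) × List (Int × Int)) (p : Int × Int) :
    (List (List Int)) × List (Int × Int) :=
  dfsF (nzMat st.1 + 1) st.1 st.2 p.1 p.2

theorem dstepN_nz (st : (List (List Int)) × List (Int × Int)) (p : Int × Int) :
    nzMat (dstepN st p).1 ≤ nzMat st.1 :=
  dfsF_nz _ _ _ _ _

-- dimensions are preserved by zeroing a cell
theorem matzero_length (m : List (List Int)) (r c : Int) :
    (matzero m r c).length = m.length := by
  simp [matzero]

theorem matzero_headD_len (m : List (List Int)) (r c : Int) :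
    ((matzero m r c).headD []).length = (m.headD []).length := by
  unfold matzero
  cases m with
  | nil => simp
  | cons a t =>
    cases h : r.toNat with
    | zero => simp [h]
    | succ n => simp [h, List.set]

-- zeroing a cell leaves every cell either unchanged or zero
theorem row_set_zero (row : List Int) (j b : Nat) :
    (row.set j 0).getD b 0 = row.getD b 0 ∨ (row.set j 0).getD b 0 = 0 := by
  induction row generalizing j b with
  | nil => simp
  | cons a t ih =>
    cases j with
    | zero => cases b <;> simp
    | succ j =>
      cases b with
      | zero => simp
      | succ b => simpa using ih j b

theorem cell_matzero (m : List (List Int)) (r c : Int) (q : Int × Int) :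
    cellAt (matzero m r c) q = cellAt m q ∨ cellAt (matzero m r c) q = 0 := by
  unfold cellAt matzero
  generalize r.toNat = i
  generalize q.1.toNat = a
  induction m generalizing i a with
  | nil => simp
  | cons row t ih =>
    cases i with
    | zero =>
      cases a with
      | zero => simpa using row_set_zero row c.toNat q.2.toNat
      | succ a => simp
    | succ i =>
      cases a with
      | zero => simp
      | succ a => simpa using ih i a

-- "m extends m₀": same dimensions, and every cell already zero in m₀ is zero in m
def MExt (m₀ m : List (List Int)) : Prop :=
  m.length = m₀.length ∧ (m.headD []).length = (m₀.headD []).length ∧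
    ∀ q, cellAt m₀ q = 0 → cellAt m q = 0

theorem Ext_refl (m : List (List Int)) : MExt m m := ⟨rfl, rfl, fun _ h => h⟩

theorem Ext_matzero {m₀ m : List (List Int)} (r c : Int) (he : MExt m₀ m) :
    MExt m₀ (matzero m r c) := by
  obtain ⟨h1, h2, h3⟩ := he
  refine ⟨by rw [matzero_length, h1], by rw [matzero_headD_len, h2], fun q hq => ?_⟩
  rcases cell_matzero m r c q with h | h
  · rw [h]; exact h3 q hq
  · exact h

theorem Ext_dfsF {m₀ : List (List Int)} (f : Nat) :
    ∀ m sh r c, MExt m₀ m → MExt m₀ (dfsF f m sh r c).1 := by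
  induction f with
  | zero => intro m sh r c he; simpa [dfsF] using he
  | succ f ih =>
    intro m sh r c he
    simp only [dfsF]
    by_cases h : dfsStop m r c
    · simpa [h] using he
    · simp only [if_neg h]
      exact ih _ _ _ _ (ih _ _ _ _ (ih _ _ _ _ (ih _ _ _ _ (Ext_matzero r c he))))

theorem Ext_dstepN {m₀ : List (List Int)} (st : (List (List Int)) × List (Int × Int))
    (p : Int × Int) (he : MExt m₀ st.1) : MExt m₀ (dstepN st p).1 :=
  Ext_dfsF _ _ _ _ _ he

-- a cell rejected by B's push guard is a no-op for A's dfs, in any later matrix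
theorem stop_of_invalid {m₀ m : List (List Int)} {q : Int × Int}
    (h : (inGrid m₀ q && (cellAt m₀ q != 0)) = false) (he : MExt m₀ m) :
    dfsStop m q.1 q.2 = true := by
  obtain ⟨h1, h2, h3⟩ := he
  by_contra hs
  rw [not_stop_iff] at hs
  obtain ⟨b1, b2, b3, b4, b5⟩ := hs
  rw [Bool.and_eq_false_iff] at h
  rcases h with h | h
  · simp only [inGrid, Bool.and_eq_false_iff, decide_eq_false_iff_not, not_le, not_lt] at h
    rw [h1] at b2; rw [h2] at b4
    rcases h with (h | h) | h
    all_goals omega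
  · simp only [bne, Bool.not_eq_false', beq_iff_eq] at h
    exact b5 (h3 q h)

theorem dstepN_noop {m₀ : List (List Int)} {q : Int × Int}
    (st : (List (List Int)) × List (Int × Int))
    (h : (inGrid m₀ q && (cellAt m₀ q != 0)) = false) (he : MExt m₀ st.1) :
    dstepN st q = st := by
  unfold dstepN
  simp only [dfsF]
  rw [if_pos (stop_of_invalid h he)]

-- dropping the rejected candidates does not change the fold of dfs calls
theorem fold_filter {m₀ : List (List Int)} :
    ∀ (l : List (Int × Int)) (st : (List (List Int)) × List (Int × Int)), MExt m₀ st.1 →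
      (l.filter (fun q => inGrid m₀ q && (cellAt m₀ q != 0))).foldl dstepN st =
        l.foldl dstepN st := by
  intro l
  induction l with
  | nil => intro st _; rfl
  | cons q t ih =>
    intro st he
    by_cases hq : (inGrid m₀ q && (cellAt m₀ q != 0)) = true
    · have hfc : List.filter (fun q => inGrid m₀ q && (cellAt m₀ q != 0)) (q :: t) =
          q :: List.filter (fun q => inGrid m₀ q && (cellAt m₀ q != 0)) t := by
        simp [List.filter_cons, hq]
      rw [hfc]
      simp only [List.foldl_cons]
      exact ih _ (Ext_dstepN st q he)
    · have hq' : (inGrid m₀ q && (cellAt m₀ q != 0)) = false := by simpa using hq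
      have hfc : List.filter (fun q => inGrid m₀ q && (cellAt m₀ q != 0)) (q :: t) =
          List.filter (fun q => inGrid m₀ q && (cellAt m₀ q != 0)) t := by
        simp [List.filter_cons, hq']
      rw [hfc]
      simp only [List.foldl_cons]
      rw [dstepN_noop st hq' he]
      exact ih st he

theorem inGrid_matzero (m : List (List Int)) (r c : Int) (q : Int × Int) :
    inGrid (matzero m r c) q = inGrid m q := by
  unfold inGrid
  rw [matzero_length, matzero_headD_len]

theorem totalCells_acc : ∀ (l : List (List Int)) (a : Nat),
    l.foldl (fun a row => a + row.length) a = a + (l.map List.length).sum := by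
  intro l
  induction l with
  | nil => intro a; simp
  | cons x t ih =>
    intro a
    simp only [List.foldl_cons, List.map_cons, List.sum_cons]
    rw [ih]
    omega

theorem totalCells_eq (m : List (List Int)) : totalCells m = (m.map List.length).sum := by
  unfold totalCells
  rw [totalCells_acc]
  omega

theorem nz_le_totalCells (m : List (List Int)) : nzMat m ≤ totalCells m := by
  rw [totalCells_eq]
  unfold nzMat
  apply List.sum_le_sum
  intro row _
  exact List.length_filter_le _ _

-- B's worklist loop IS the fold of full dfs calls over the worklist
theorem floodB_eq (f : Nat) : ∀ (m : List (List Int)) (sh : List (Int × Int))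
    (stack : List (Int × Int)), (∀ q ∈ stack, inGrid m q = true) →
    stack.length + 4 * nzMat m < f →
    floodB f (m, sh) stack = stack.foldl dstepN (m, sh) := by
  induction f with
  | zero => intro m sh stack _ hf; exact absurd hf (Nat.not_lt_zero _)
  | succ f ih =>
    intro m sh stack hin hf
    match stack with
    | [] => rfl
    | p :: rest =>
      have hp : inGrid m p = true := hin p (List.mem_cons_self ..)
      simp only [floodB]
      by_cases hc : (cellAt m p == 0) = true
      · rw [if_pos hc]
        rw [ih m sh rest (fun q hq => hin q (List.mem_cons_of_mem _ hq))
          (by simp only [List.length_cons] at hf; omega)]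
        simp only [List.foldl_cons]
        rw [dstepN_noop (m, sh) (by simp only [Bool.and_eq_false_iff]; right; simpa using hc)
          (Ext_refl m)]
      · rw [if_neg hc]
        have hcell : matget m p.1 p.2 ≠ 0 := by simpa [cellAt, matget] using hc
        have hstop : ¬ dfsStop m p.1 p.2 = true := by
          rw [not_stop_iff]
          simp only [inGrid, Bool.and_eq_true, decide_eq_true_eq] at hp
          exact ⟨hp.1.1.1, hp.1.1.2, hp.1.2, hp.2, hcell⟩
        have hmz : clearAt m p = matzero m p.1 p.2 := rfl
        have hnz : nzMat (clearAt m p) < nzMat m := by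
          rw [hmz]; exact nz_matzero_lt m p.1 p.2 hcell
        have hdim : ∀ q, inGrid (clearAt m p) q = inGrid m q := by
          intro q; rw [hmz]; exact inGrid_matzero m p.1 p.2 q
        set nbrs := [(p.1 + 1, p.2), (p.1 - 1, p.2), (p.1, p.2 + 1), (p.1, p.2 - 1)].filter
          (fun q => inGrid (clearAt m p) q && (cellAt (clearAt m p) q != 0)) with hnbrs
        have hlen4 : nbrs.length ≤ 4 := by
          rw [hnbrs]
          exact le_trans (List.length_filter_le _ _) (by simp)
        have hin' : ∀ q ∈ nbrs ++ rest, inGrid (clearAt m p) q = true := by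
          intro q hq
          rcases List.mem_append.mp hq with hq | hq
          · have := List.of_mem_filter hq
            exact (Bool.and_eq_true _ _ |>.mp this).1
          · rw [hdim q]; exact hin q (List.mem_cons_of_mem _ hq)
        rw [ih (clearAt m p) (sh ++ [p]) (nbrs ++ rest) hin'
          (by simp only [List.length_append, List.length_cons] at hf ⊢; omega)]
        rw [List.foldl_append]
        rw [hnbrs, fold_filter _ _ (Ext_refl _)]
        simp only [List.foldl_cons, List.foldl_nil]
        -- identify the head dfs call with the four nested dfs calls
        have hd : dstepN (m, sh) p =
            dstepN (dstepN (dstepN (dstepN (clearAt m p, sh ++ [p])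
              (p.1 + 1, p.2)) (p.1 - 1, p.2)) (p.1, p.2 + 1)) (p.1, p.2 - 1) := by
          show dfsF (nzMat m + 1) m sh p.1 p.2 = _
          simp only [dfsF]
          rw [if_neg hstop]
          rw [hmz] at hnz ⊢
          rw [show dfsF (nzMat m) (matzero m p.1 p.2) (sh ++ [p]) (p.1 + 1) p.2 =
              dstepN (matzero m p.1 p.2, sh ++ [p]) (p.1 + 1, p.2) from
            dfsF_fuel (nzMat m) _ _ _ _ _ hnz (Nat.lt_succ_self _)]
          set t1 := dstepN (matzero m p.1 p.2, sh ++ [p]) (p.1 + 1, p.2) with ht1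
          have m1 : nzMat t1.1 < nzMat m := lt_of_le_of_lt (dstepN_nz _ _) hnz
          rw [show dfsF (nzMat m) t1.1 t1.2 (p.1 - 1) p.2 = dstepN t1 (p.1 - 1, p.2) from
            dfsF_fuel (nzMat m) _ _ _ _ _ m1 (Nat.lt_succ_self _)]
          set t2 := dstepN t1 (p.1 - 1, p.2) with ht2
          have m2 : nzMat t2.1 < nzMat m := lt_of_le_of_lt (dstepN_nz _ _) m1
          rw [show dfsF (nzMat m) t2.1 t2.2 p.1 (p.2 + 1) = dstepN t2 (p.1, p.2 + 1) from
            dfsF_fuel (nzMat m) _ _ _ _ _ m2 (Nat.lt_succ_self _)]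
          set t3 := dstepN t2 (p.1, p.2 + 1) with ht3
          have m3 : nzMat t3.1 < nzMat m := lt_of_le_of_lt (dstepN_nz _ _) m2
          rw [show dfsF (nzMat m) t3.1 t3.2 p.1 (p.2 - 1) = dstepN t3 (p.1, p.2 - 1) from
            dfsF_fuel (nzMat m) _ _ _ _ _ m3 (Nat.lt_succ_self _)]
        rw [hd, hmz]

-- sort-first normalization agrees with A's min-then-shift-then-sort normalization
theorem head_insertBy {α : Type} (bf : α → α → Bool) (x : α) (acc : List α) :
    (PySem.List.insertBy bf x acc).head? =
      some (match acc with | [] => x | y :: _ => if bf x y then x else y) := by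
  cases acc <;> simp [PySem.List.insertBy] <;> split <;> simp

theorem head_foldl_insertBy {α : Type} (bf : α → α → Bool) :
    ∀ (l acc : List α), ((l.foldl (fun acc x => PySem.List.insertBy bf x acc) acc).head?) =
      l.foldl (fun o x => match o with
        | none => some x
        | some m => if bf x m then some x else some m) acc.head? := by
  intro l
  induction l with
  | nil => intro acc; rfl
  | cons x t ih =>
    intro acc
    simp only [List.foldl_cons]
    rw [ih]
    congr 1
    rw [head_insertBy]
    cases acc with
    | nil => rfl
    | cons y ys =>
      show some (if bf x y then x else y) = if bf x y then some x else some y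
      split <;> rfl

theorem min2_eq_head_sorted2 (l : List (Int × Int)) :
    PySem.List.min2? l (fun p => p.1) (fun p => p.2) =
      (PySem.List.sorted2 l (fun p => p.1) (fun p => p.2)).head? := by
  unfold PySem.List.min2? PySem.List.sorted2
  simp only [if_pos rfl]
  rw [head_foldl_insertBy]
  rfl

-- the lexicographic comparison is translation-invariant
theorem bf_shift (b x y : Int × Int) :
    (decide ((x.1 - b.1) < (y.1 - b.1)) ||
      (!decide ((y.1 - b.1) < (x.1 - b.1)) && decide ((x.2 - b.2) < (y.2 - b.2)))) =
    (decide (x.1 < y.1) || (!decide (y.1 < x.1) && decide (x.2 < y.2))) := by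
  have e1 : decide ((x.1 - b.1) < (y.1 - b.1)) = decide (x.1 < y.1) :=
    decide_eq_decide.mpr (by omega)
  have e2 : decide ((y.1 - b.1) < (x.1 - b.1)) = decide (y.1 < x.1) :=
    decide_eq_decide.mpr (by omega)
  have e3 : decide ((x.2 - b.2) < (y.2 - b.2)) = decide (x.2 < y.2) :=
    decide_eq_decide.mpr (by omega)
  rw [e1, e2, e3]

theorem insertBy_shift (b : Int × Int)
    (bf : Int × Int → Int × Int → Bool)
    (hbf : bf = fun x y => decide (x.1 < y.1) || (!decide (y.1 < x.1) && decide (x.2 < y.2)))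
    (x : Int × Int) :
    ∀ acc : List (Int × Int),
      PySem.List.insertBy bf ((x.1 - b.1, x.2 - b.2))
        (acc.map (fun q => (q.1 - b.1, q.2 - b.2))) =
      (PySem.List.insertBy bf x acc).map (fun q => (q.1 - b.1, q.2 - b.2)) := by
  intro acc
  induction acc with
  | nil => rfl
  | cons y ys ih =>
    simp only [List.map_cons, PySem.List.insertBy]
    have hc : bf (x.1 - b.1, x.2 - b.2) (y.1 - b.1, y.2 - b.2) = bf x y := by
      rw [hbf]; exact bf_shift b x y
    rw [hc]
    by_cases h : bf x y = true
    · simp [h]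
    · simp only [Bool.not_eq_true] at h
      simp [h, ih]

theorem sorted2_shift (b : Int × Int) (l : List (Int × Int)) :
    PySem.List.sorted2 (l.map (fun q => (q.1 - b.1, q.2 - b.2)))
      (fun p => p.1) (fun p => p.2) =
    (PySem.List.sorted2 l (fun p => p.1) (fun p => p.2)).map
      (fun q => (q.1 - b.1, q.2 - b.2)) := by
  unfold PySem.List.sorted2
  simp only [if_pos rfl]
  suffices h : ∀ (l acc : List (Int × Int)),
      (l.map (fun q => (q.1 - b.1, q.2 - b.2))).foldl
        (fun acc x => PySem.List.insertBy
          (fun a c => decide (a.1 < c.1) || (!decide (c.1 < a.1) && decide (a.2 < c.2))) x acc)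
        (acc.map (fun q => (q.1 - b.1, q.2 - b.2))) =
      (l.foldl (fun acc x => PySem.List.insertBy
          (fun a c => decide (a.1 < c.1) || (!decide (c.1 < a.1) && decide (a.2 < c.2))) x acc)
        acc).map (fun q => (q.1 - b.1, q.2 - b.2)) by
    exact h l []
  intro l
  induction l with
  | nil => intro acc; rfl
  | cons x t ih =>
    intro acc
    simp only [List.map_cons, List.foldl_cons]
    rw [insertBy_shift b _ rfl x acc]
    exact ih _

theorem canon_eq_normalize (sh : List (Int × Int)) : canonShape sh = normalizeShape sh := by
  unfold canonShape normalizeShape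
  rw [min2_eq_head_sorted2]
  cases h : PySem.List.sorted2 sh (fun p => p.1) (fun p => p.2) with
  | nil => rfl
  | cons base t =>
    obtain ⟨mr, mc⟩ := base
    simp only [List.head?_cons]
    rw [sorted2_shift (mr, mc) sh, h]

-- the two loop bodies agree on in-grid cells
theorem step_eq (st : (List (List Int)) × PySem.Set (List (Int × Int)))
    (p : Int × Int) (hp : inGrid st.1 p = true) : stepB st p = stepA st p.1 p.2 := by
  unfold stepB stepA
  have hcg : (cellAt st.1 p == 1) = (matget st.1 p.1 p.2 == 1) := rfl
  rw [hcg]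
  by_cases h : (matget st.1 p.1 p.2 == 1) = true
  · rw [if_pos h, if_pos h]
    rw [floodB_eq (4 * totalCells st.1 + 2) st.1 [] [p] (by intro q hq; simp at hq; subst hq; exact hp)
      (by have := nz_le_totalCells st.1; simp only [List.length_cons, List.length_nil]; omega)]
    simp only [List.foldl_cons, List.foldl_nil]
    show ((dfsF (nzMat st.1 + 1) st.1 [] p.1 p.2).1,
        PySem.Set.add st.2 (canonShape (dfsF (nzMat st.1 + 1) st.1 [] p.1 p.2).2)) = _
    rw [canon_eq_normalize]
  · rw [if_neg h, if_neg h]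

-- the loop bodies preserve the matrix dimensions
theorem stepA_dims (st : (List (List Int)) × PySem.Set (List (Int × Int))) (r c : Int) :
    (stepA st r c).1.length = st.1.length ∧
      ((stepA st r c).1.headD []).length = (st.1.headD []).length := by
  unfold stepA
  by_cases h : (matget st.1 r c == 1) = true
  · rw [if_pos h]
    obtain ⟨h1, h2, _⟩ := Ext_dfsF (m₀ := st.1) (nzMat st.1 + 1) st.1 [] r c (Ext_refl st.1)
    exact ⟨h1, h2⟩
  · rw [if_neg h]; exact ⟨rfl, rfl⟩

theorem inner_dims (R W : Nat) (r : Int) :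
    ∀ (cs : List Int) (st : (List (List Int)) × PySem.Set (List (Int × Int))),
      st.1.length = R → (st.1.headD []).length = W →
      (cs.foldl (fun st c => stepA st r c) st).1.length = R ∧
        ((cs.foldl (fun st c => stepA st r c) st).1.headD []).length = W := by
  intro cs
  induction cs with
  | nil => intro st h1 h2; exact ⟨h1, h2⟩
  | cons c t ih =>
    intro st h1 h2
    simp only [List.foldl_cons]
    obtain ⟨d1, d2⟩ := stepA_dims st r c
    exact ih _ (by rw [d1, h1]) (by rw [d2, h2])

theorem inner_eq (R W : Nat) (r : Int) (hr0 : 0 ≤ r) (hr1 : r < (R : Int)) :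
    ∀ (cs : List Int) (st : (List (List Int)) × PySem.Set (List (Int × Int))),
      st.1.length = R → (st.1.headD []).length = W → (∀ c ∈ cs, 0 ≤ c ∧ c < (W : Int)) →
      cs.foldl (fun st c => stepB st (r, c)) st = cs.foldl (fun st c => stepA st r c) st := by
  intro cs
  induction cs with
  | nil => intro st _ _ _; rfl
  | cons c t ih =>
    intro st h1 h2 hb
    simp only [List.foldl_cons]
    obtain ⟨hc0, hc1⟩ := hb c (List.mem_cons_self ..)
    have hg : inGrid st.1 (r, c) = true := by
      simp only [inGrid, Bool.and_eq_true, decide_eq_true_eq]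
      rw [h1, h2]
      exact ⟨⟨⟨hr0, hr1⟩, hc0⟩, hc1⟩
    rw [step_eq st (r, c) hg]
    obtain ⟨d1, d2⟩ := stepA_dims st r c
    exact ih _ (by rw [d1, h1]) (by rw [d2, h2]) (fun c hc => hb c (List.mem_cons_of_mem _ hc))

theorem outer_eq (R W : Nat) (cs : List Int) (hcs : ∀ c ∈ cs, 0 ≤ c ∧ c < (W : Int)) :
    ∀ (rs : List Int) (st : (List (List Int)) × PySem.Set (List (Int × Int))),
      st.1.length = R → (st.1.headD []).length = W → (∀ r ∈ rs, 0 ≤ r ∧ r < (R : Int)) →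
      rs.foldl (fun st r => cs.foldl (fun st c => stepB st (r, c)) st) st =
        rs.foldl (fun st r => cs.foldl (fun st c => stepA st r c) st) st := by
  intro rs
  induction rs with
  | nil => intro st _ _ _; rfl
  | cons r t ih =>
    intro st h1 h2 hb
    simp only [List.foldl_cons]
    obtain ⟨hr0, hr1⟩ := hb r (List.mem_cons_self ..)
    rw [inner_eq R W r hr0 hr1 cs st h1 h2 hcs]
    obtain ⟨d1, d2⟩ := inner_dims R W r cs st h1 h2
    exact ih _ d1 d2 (fun r hr => hb r (List.mem_cons_of_mem _ hr))

theorem foldl_flat (rs cs : List Int) :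
    ∀ st : (List (List Int)) × PySem.Set (List (Int × Int)),
      ((rs.flatMap fun r => cs.map fun c => ((r : Int), (c : Int))).foldl stepB st) =
        rs.foldl (fun st r => cs.foldl (fun st c => stepB st (r, c)) st) st := by
  induction rs with
  | nil => intro st; rfl
  | cons r t ih =>
    intro st
    simp only [List.flatMap_cons, List.foldl_append, List.foldl_cons, List.foldl_map]
    exact ih _

theorem port_eq (matrix : List (List Int)) :
    countIdenticalShapes matrix = countIdenticalShapes_alt matrix := by
  have hflat := foldl_flat (PySem.List.pyRange 0 (matrix.length : Int) 1)
    (PySem.List.pyRange 0 ((matrix.headD []).length : Int) 1) (matrix, PySem.Set.empty)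
  have houter := outer_eq matrix.length (matrix.headD []).length
    (PySem.List.pyRange 0 ((matrix.headD []).length : Int) 1)
    (fun c hc => (PySem.List.mem_pyRange_one).mp hc)
    (PySem.List.pyRange 0 (matrix.length : Int) 1)
    (matrix, PySem.Set.empty) rfl rfl
    (fun r hr => (PySem.List.mem_pyRange_one).mp hr)
  show PySem.List.len ((PySem.List.pyRange 0 (matrix.length : Int) 1).foldl
      (fun st r => (PySem.List.pyRange 0 ((matrix.headD []).length : Int) 1).foldl
        (fun st c => stepA st r c) st) (matrix, PySem.Set.empty)).2 =
    PySem.List.len (((PySem.List.pyRange 0 (matrix.length : Int) 1).flatMap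
      (fun r => (PySem.List.pyRange 0 ((matrix.headD []).length : Int) 1).map
        (fun c => (r, c)))).foldl stepB (matrix, PySem.Set.empty)).2
  rw [hflat, houter]

-- ===== VERDICT (by name: the statement is the Claim_ definition above) =====
theorem countIdenticalShapes_spec : Claim_equal_countIdenticalShapes := by
  intro matrix _ _
  unfold Spec_countIdenticalShapes
  exact port_eq matrix
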